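-- pv_equiv track=rewrite | github.com/AuroraBoreas/pypj_sonic_pc | _99_py_SOX_pkg_v0.0.3 -git/lib/pkg/converter.py | extract_16_from_32
-- ===== SOURCE A (Python) =====
-- def extract_16_from_32(arr):
--     """Extract 16bit data from 32bit array
--
--     :param arr: an array of 32bit bytes
--     :type arr: list
--
--                             0    1    2    3    4    5    6    7
--     >>> extract_16_from_32(0100 1000 0001 0001 0101 1001 0101 0101)
--           0     2     4     6
--     >>> [0100, 0001, 0101, 0101]
--     """
--     start = 0
--     stop = len(arr)
--     step = 4
--     tmp_list = []
--     for i in range(start, stop, step):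
--         tmp_list.extend(arr[i:i+2])
--     return tmp_list
-- ===== SOURCE B (Python) =====
-- def extract_16_from_32(arr):
--     """Keep the first two elements of every 4-element group: one flat
--     enumerate pass filtering on index mod 4, instead of a stepped
--     range loop with slicing."""
--     return [x for i, x in enumerate(arr) if i % 4 < 2]
-- ===== Notes on version B (the rewrite author's own statement) =====
-- stated objective: simpler
-- what changed: Replaces the stepped range(0,len,4) loop that extends an accumulator with slices arr[i:i+2] by a single flat enumerate pass selecting elements whose index satisfies i % 4 < 2.
import Mathlib
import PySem

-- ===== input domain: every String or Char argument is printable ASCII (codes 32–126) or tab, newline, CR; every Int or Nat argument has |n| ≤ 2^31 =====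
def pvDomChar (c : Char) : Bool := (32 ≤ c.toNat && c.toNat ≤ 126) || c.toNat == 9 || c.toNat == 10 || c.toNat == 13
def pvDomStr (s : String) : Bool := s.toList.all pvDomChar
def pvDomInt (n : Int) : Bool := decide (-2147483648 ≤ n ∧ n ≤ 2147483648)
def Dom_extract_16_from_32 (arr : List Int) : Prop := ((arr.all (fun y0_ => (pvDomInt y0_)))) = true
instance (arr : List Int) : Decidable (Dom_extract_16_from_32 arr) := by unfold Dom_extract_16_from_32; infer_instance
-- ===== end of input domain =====

-- B replaces A's stepped range(0,len,4) loop over slices arr[i:i+2] by one flat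
-- enumerate pass filtering indexes with i % 4 < 2 (objective: simpler).


-- ===== PORT A =====
-- for i in range(0, len(arr), 4): tmp_list.extend(arr[i:i+2])
def extract_16_from_32 (arr : List Int) : List Int :=
  (PySem.List.pyRange 0 (PySem.List.len arr) 4).foldl
    (fun tmp_list i => tmp_list ++ PySem.List.slice arr (some i) (some (i + 2))) []

-- ===== PORT B =====
-- [x for i, x in enumerate(arr) if i % 4 < 2]
def extract_16_from_32_alt (arr : List Int) : List Int :=
  ((PySem.List.enumerate arr 0).filter (fun p => PySem.Int.mod p.1 4 < 2)).map (·.2)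

-- ===== PRECONDITION & SPEC =====
def Spec_extract_16_from_32 (arr : List Int) (out : List Int) : Prop := out = extract_16_from_32_alt arr
instance (arr : List Int) (out : List Int) : Decidable (Spec_extract_16_from_32 arr out) := by unfold Spec_extract_16_from_32; infer_instance

-- ===== CLAIM (what is proved, stated in full; the proofs are below) =====
def Claim_equal_extract_16_from_32 : Prop := ∀ (arr : List Int), Dom_extract_16_from_32 arr → Spec_extract_16_from_32 arr (extract_16_from_32 arr)

-- ===== LEMMAS AND PROOFS =====

-- proof-side reference shape: the first two elements of every 4-element group
def pvRef (xs : List Int) : List Int :=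
  match xs with
  | [] => []
  | [a] => [a]
  | [a, b] => [a, b]
  | [a, b, _] => [a, b]
  | a :: b :: _ :: _ :: t => a :: b :: pvRef t

lemma pvRange4_shift (n : Nat) :
    PySem.List.pyRange 0 ((n : Int) + 4) 4 = 0 :: (PySem.List.pyRange 0 (n : Int) 4).map (· + 4) := by
  rw [PySem.List.pyRange_of_pos _ _ (by norm_num), PySem.List.pyRange_of_pos _ _ (by norm_num)]
  rcases Nat.eq_zero_or_pos n with h | h
  · subst h; decide
  · have h1 : (0 : Int) < (n : Int) := by exact_mod_cast h
    rw [if_pos (by omega), if_pos (by omega)]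
    have e1 : (((n : Int) + 4 - 0 + 4 - 1) / 4).toNat = ((n + 3) / 4) + 1 := by omega
    have e2 : (((n : Int) - 0 + 4 - 1) / 4).toNat = (n + 3) / 4 := by omega
    rw [e1, e2, List.range_succ_eq_map]
    simp [List.map_map, Function.comp]
    intro a _; ring

lemma pvSlice_shift (a b c d : Int) (t : List Int) (i : Int) (hi : 0 ≤ i) :
    PySem.List.slice (a :: b :: c :: d :: t) (some (i + 4)) (some (i + 4 + 2)) =
      PySem.List.slice t (some i) (some (i + 2)) := by
  rw [PySem.List.slice_toNat _ (by omega) (by omega),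
      PySem.List.slice_toNat _ hi (by omega)]
  have h4 : (i + 4).toNat = i.toNat + 4 := by omega
  have h6 : (i + 4 + 2).toNat = i.toNat + 6 := by omega
  have h2 : (i + 2).toNat = i.toNat + 2 := by omega
  rw [h4, h6, h2, show i.toNat + 6 - (i.toNat + 4) = 2 by omega, show i.toNat + 2 - i.toNat = 2 by omega,
      show i.toNat + 4 = (((i.toNat + 1) + 1) + 1) + 1 from rfl]
  simp [List.drop_succ_cons]

lemma pvA_flatMap (arr : List Int) :
    extract_16_from_32 arr =
      (PySem.List.pyRange 0 (PySem.List.len arr) 4).flatMap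
        (fun i => PySem.List.slice arr (some i) (some (i + 2))) := by
  unfold extract_16_from_32
  rw [PySem.List.foldl_append_eq_flatMap]
  simp

lemma pvA_step (a b c d : Int) (t : List Int) :
    extract_16_from_32 (a :: b :: c :: d :: t) = a :: b :: extract_16_from_32 t := by
  rw [pvA_flatMap, pvA_flatMap]
  have hlen : PySem.List.len (a :: b :: c :: d :: t) = (t.length : Int) + 4 := by
    simp [PySem.List.len_eq]; ring
  rw [hlen, pvRange4_shift, List.flatMap_cons, List.flatMap_map]
  have hsl0 : PySem.List.slice (a :: b :: c :: d :: t) (some 0) (some (0 + 2)) = [a, b] := by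
    rw [PySem.List.slice_toNat _ (by omega) (by omega)]; rfl
  rw [hsl0]
  have hmap : (PySem.List.pyRange 0 ((t.length : Int)) 4).flatMap
      (fun i => PySem.List.slice (a :: b :: c :: d :: t) (some (i + 4)) (some (i + 4 + 2))) =
      (PySem.List.pyRange 0 ((t.length : Int)) 4).flatMap
      (fun i => PySem.List.slice t (some i) (some (i + 2))) := by
    simp only [List.flatMap_def]
    refine congrArg List.flatten (List.map_congr_left ?_)
    intro i hi
    exact pvSlice_shift a b c d t i (((PySem.List.mem_pyRange_iff_of_pos (by norm_num) i).1 hi).1)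
  simp only [PySem.List.len_eq]
  rw [hmap]
  simp

lemma pvB_shift (t : List Int) (s : Int) :
    ((PySem.List.enumerate t (s + 4)).filter (fun p => PySem.Int.mod p.1 4 < 2)).map (·.2) =
      ((PySem.List.enumerate t s).filter (fun p => PySem.Int.mod p.1 4 < 2)).map (·.2) := by
  induction t generalizing s with
  | nil => simp [PySem.List.enumerate_nil]
  | cons x xs ih =>
    rw [PySem.List.enumerate_cons, PySem.List.enumerate_cons]
    have hm : PySem.Int.mod (s + 4) 4 = PySem.Int.mod s 4 := by
      rw [PySem.Int.mod_eq_emod_of_pos (by norm_num), PySem.Int.mod_eq_emod_of_pos (by norm_num)]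
      omega
    simp only [List.filter_cons, hm]
    by_cases hc : PySem.Int.mod s 4 < 2
    · simp only [decide_eq_true_eq, if_pos hc, List.map_cons]
      rw [show s + 4 + 1 = (s + 1) + 4 by ring, ih]
    · simp only [decide_eq_true_eq, if_neg hc]
      rw [show s + 4 + 1 = (s + 1) + 4 by ring, ih]

lemma pvB_step (a b c d : Int) (t : List Int) :
    extract_16_from_32_alt (a :: b :: c :: d :: t) = a :: b :: extract_16_from_32_alt t := by
  unfold extract_16_from_32_alt
  rw [PySem.List.enumerate_cons, PySem.List.enumerate_cons, PySem.List.enumerate_cons,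
      PySem.List.enumerate_cons]
  simp only [List.filter_cons, decide_eq_true_eq,
    if_pos (show PySem.Int.mod 0 4 < 2 from by decide),
    if_pos (show PySem.Int.mod (0 + 1) 4 < 2 from by decide),
    if_neg (show ¬ PySem.Int.mod (0 + 1 + 1) 4 < 2 from by decide),
    if_neg (show ¬ PySem.Int.mod (0 + 1 + 1 + 1) 4 < 2 from by decide),
    List.map_cons]
  rw [show (0 : Int) + 1 + 1 + 1 + 1 = 0 + 4 by ring, pvB_shift]

lemma pvA_ref (xs : List Int) : extract_16_from_32 xs = pvRef xs := by
  induction xs using pvRef.induct with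
  | case1 => decide
  | case2 a =>
    rw [pvA_flatMap]
    have hl : PySem.List.len [a] = 1 := by simp [PySem.List.len_eq]
    rw [hl, show PySem.List.pyRange 0 1 4 = [0] from by decide, List.flatMap_cons,
        PySem.List.slice_toNat _ (by norm_num) (by norm_num)]
    simp [pvRef]
  | case3 a b =>
    rw [pvA_flatMap]
    have hl : PySem.List.len [a, b] = 2 := by simp [PySem.List.len_eq]
    rw [hl, show PySem.List.pyRange 0 2 4 = [0] from by decide, List.flatMap_cons,
        PySem.List.slice_toNat _ (by norm_num) (by norm_num)]
    simp [pvRef]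
  | case4 a b c =>
    rw [pvA_flatMap]
    have hl : PySem.List.len [a, b, c] = 3 := by simp [PySem.List.len_eq]
    rw [hl, show PySem.List.pyRange 0 3 4 = [0] from by decide, List.flatMap_cons,
        PySem.List.slice_toNat _ (by norm_num) (by norm_num)]
    simp [pvRef]
  | case5 a b c d t ih => rw [pvA_step, pvRef, ih]

lemma pvB_ref (xs : List Int) : extract_16_from_32_alt xs = pvRef xs := by
  induction xs using pvRef.induct with
  | case1 => decide
  | case2 a =>
    simp [extract_16_from_32_alt, pvRef, PySem.List.enumerate_cons, PySem.List.enumerate_nil]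
  | case3 a b =>
    simp [extract_16_from_32_alt, pvRef, PySem.List.enumerate_cons, PySem.List.enumerate_nil]
  | case4 a b c =>
    simp [extract_16_from_32_alt, pvRef, PySem.List.enumerate_cons, PySem.List.enumerate_nil]
  | case5 a b c d t ih => rw [pvB_step, pvRef, ih]

-- ===== VERDICT (by name: the statement is the Claim_ definition above) =====
theorem extract_16_from_32_spec : Claim_equal_extract_16_from_32 := by
  intro arr _
  unfold Spec_extract_16_from_32
  rw [pvA_ref, pvB_ref]
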